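-- pv_equiv track=rewrite | github.com/wgcv/github-campus-experts-stats | scrape.py | getWhen
-- ===== SOURCE A (Python) =====
-- def getWhen(text):
-- 	month = ''
-- 	for i in text:
-- 		if(i.upper().find('JANUARY') !=-1 or i.upper().find('JAN') !=-1 ):
-- 			month = 'JANUARY'
-- 		if(i.upper().find('FEBRUARY') !=-1 or i.upper().find('FEB') !=-1 ):
-- 			month = 'FEBRUARY'
-- 		if(i.upper().find('MARCH') !=-1 or i.upper().find('MAR') !=-1 ):
-- 			month = 'MARCH'
-- 		if(i.upper().find('APRIL') !=-1 or i.upper().find('APRIL') !=-1 ):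
-- 			month = 'APRIL'
-- 		if(i.upper().find('MAY') !=-1 or i.upper().find('MAY') !=-1 ):
-- 			month = 'MAY'
-- 		if(i.upper().find('JUNE') !=-1 or i.upper().find('JUN') !=-1 ):
-- 			month = 'JUNE'
-- 		if(i.upper().find('JULY') !=-1 or i.upper().find('JUL') !=-1 ):
-- 			month = 'JULY'
-- 		if(i.upper().find('AUGUST') !=-1 or i.upper().find('AUG') !=-1 ):
-- 			month = 'AUGUST'
-- 		if(i.upper().find('SEPTEMBER') !=-1 or i.upper().find('SEPT') !=-1 or i.upper().find('SEP') !=-1 ):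
-- 			month = 'SEPTEMBER'
-- 		if(i.upper().find('OCTOBER') !=-1 or i.upper().find('OCT') !=-1 ):
-- 			month = 'OCTOBER'
-- 		if(i.upper().find('NOVEMBER') !=-1 or i.upper().find('NOV') !=-1 ):
-- 			month = 'NOVEMBER'
-- 		if(i.upper().find('DECEMBER') !=-1 or i.upper().find('DEC') !=-1 ):
-- 			month = 'DECEMBER'
-- 	return month
-- ===== SOURCE B (Python) =====
-- MONTHS = [('JAN', 'JANUARY'), ('FEB', 'FEBRUARY'), ('MAR', 'MARCH'),
--           ('APRIL', 'APRIL'), ('MAY', 'MAY'), ('JUN', 'JUNE'),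
--           ('JUL', 'JULY'), ('AUG', 'AUGUST'), ('SEP', 'SEPTEMBER'),
--           ('OCT', 'OCTOBER'), ('NOV', 'NOVEMBER'), ('DEC', 'DECEMBER')]
--
--
-- def getWhen(text):
--     # scan the strings back-to-front and, within a string, the months
--     # Dec->Jan; the first hit is the overall "last wins" answer.
--     for s in reversed(text):
--         u = s.upper()
--         for key, name in reversed(MONTHS):
--             if key in u:
--                 return name
--     return ''
-- ===== Notes on version B (the rewrite author's own statement) =====
-- stated objective: simpler
-- what changed: Replaces A's twelve hard-coded if-blocks that overwrite an accumulator over the whole list by a table-driven backwards scan with early return: each full month name contains its abbreviation, so one containment test per month suffices, and the first hit scanning strings back-to-front and months Dec-to-Jan is exactly A's last-wins answer.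
import Mathlib
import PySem

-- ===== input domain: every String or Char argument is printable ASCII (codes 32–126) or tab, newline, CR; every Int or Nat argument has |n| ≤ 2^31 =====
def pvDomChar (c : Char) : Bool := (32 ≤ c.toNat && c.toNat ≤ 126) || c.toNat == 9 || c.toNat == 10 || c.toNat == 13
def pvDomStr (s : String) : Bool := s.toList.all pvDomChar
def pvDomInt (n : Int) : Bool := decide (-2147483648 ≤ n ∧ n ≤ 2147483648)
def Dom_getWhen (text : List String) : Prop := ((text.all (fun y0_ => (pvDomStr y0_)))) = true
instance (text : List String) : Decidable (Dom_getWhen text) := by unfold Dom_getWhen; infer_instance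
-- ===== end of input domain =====

-- B replaces A's twelve if-blocks overwriting an accumulator by a table-driven
-- backwards scan with early return (one abbreviation key per month); objective: simpler.

-- ===== PORT A =====
-- one iteration of A's for-loop body: twelve sequential if-statements updating month
def getWhenStep (month : String) (i : String) : String :=
  let month := if PySem.Str.find (PySem.Str.upper i) "JANUARY" != -1 || PySem.Str.find (PySem.Str.upper i) "JAN" != -1 then "JANUARY" else month
  let month := if PySem.Str.find (PySem.Str.upper i) "FEBRUARY" != -1 || PySem.Str.find (PySem.Str.upper i) "FEB" != -1 then "FEBRUARY" else month
  let month := if PySem.Str.find (PySem.Str.upper i) "MARCH" != -1 || PySem.Str.find (PySem.Str.upper i) "MAR" != -1 then "MARCH" else month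
  let month := if PySem.Str.find (PySem.Str.upper i) "APRIL" != -1 || PySem.Str.find (PySem.Str.upper i) "APRIL" != -1 then "APRIL" else month
  let month := if PySem.Str.find (PySem.Str.upper i) "MAY" != -1 || PySem.Str.find (PySem.Str.upper i) "MAY" != -1 then "MAY" else month
  let month := if PySem.Str.find (PySem.Str.upper i) "JUNE" != -1 || PySem.Str.find (PySem.Str.upper i) "JUN" != -1 then "JUNE" else month
  let month := if PySem.Str.find (PySem.Str.upper i) "JULY" != -1 || PySem.Str.find (PySem.Str.upper i) "JUL" != -1 then "JULY" else month
  let month := if PySem.Str.find (PySem.Str.upper i) "AUGUST" != -1 || PySem.Str.find (PySem.Str.upper i) "AUG" != -1 then "AUGUST" else month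
  let month := if PySem.Str.find (PySem.Str.upper i) "SEPTEMBER" != -1 || PySem.Str.find (PySem.Str.upper i) "SEPT" != -1 || PySem.Str.find (PySem.Str.upper i) "SEP" != -1 then "SEPTEMBER" else month
  let month := if PySem.Str.find (PySem.Str.upper i) "OCTOBER" != -1 || PySem.Str.find (PySem.Str.upper i) "OCT" != -1 then "OCTOBER" else month
  let month := if PySem.Str.find (PySem.Str.upper i) "NOVEMBER" != -1 || PySem.Str.find (PySem.Str.upper i) "NOV" != -1 then "NOVEMBER" else month
  let month := if PySem.Str.find (PySem.Str.upper i) "DECEMBER" != -1 || PySem.Str.find (PySem.Str.upper i) "DEC" != -1 then "DECEMBER" else month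
  month

def getWhen (text : List String) : String := text.foldl getWhenStep ""

-- ===== PORT B =====
def getWhenMONTHS : List (String × String) :=
  [("JAN", "JANUARY"), ("FEB", "FEBRUARY"), ("MAR", "MARCH"),
   ("APRIL", "APRIL"), ("MAY", "MAY"), ("JUN", "JUNE"),
   ("JUL", "JULY"), ("AUG", "AUGUST"), ("SEP", "SEPTEMBER"),
   ("OCT", "OCTOBER"), ("NOV", "NOVEMBER"), ("DEC", "DECEMBER")]

-- inner loop of B: 'for key, name in reversed(MONTHS): if key in u: return name'
def getWhenPick (s : String) : Option String :=
  (getWhenMONTHS.reverse).findSome? (fun p =>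
    if PySem.Str.isIn p.1 (PySem.Str.upper s) then some p.2 else none)

-- outer loop of B: 'for s in reversed(text): ... return name' / 'return ""'
def getWhenOuter : List String → String
  | [] => ""
  | s :: rest =>
    match getWhenPick s with
    | some name => name
    | none => getWhenOuter rest

def getWhen_alt (text : List String) : String := getWhenOuter text.reverse

-- ===== PRECONDITION & SPEC =====
def Spec_getWhen (text : List String) (out : String) : Prop := out = getWhen_alt text
instance (text : List String) (out : String) : Decidable (Spec_getWhen text out) := by unfold Spec_getWhen; infer_instance

-- ===== CLAIM (what is proved, stated in full; the proofs are below) =====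
def Claim_equal_getWhen : Prop := ∀ (text : List String), Dom_getWhen text → Spec_getWhen text (getWhen text)

-- ===== LEMMAS AND PROOFS =====

-- A fold whose step is "replace the accumulator iff a pick fires" equals the
-- first pick found scanning the list backwards (default: the initial value).
theorem pv_foldl_eq_rev_findSome {α β : Type} (pick : α → Option β)
    (step : β → α → β) (h : ∀ m s, step m s = (pick s).getD m) :
    ∀ (xs : List α) (m : β), xs.foldl step m = ((xs.reverse).findSome? pick).getD m := by
  intro xs
  induction xs using List.reverseRecOn with
  | nil => intro m; simp
  | append_singleton ys p ih =>
    intro m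
    rw [List.foldl_append, List.foldl_cons, List.foldl_nil, h, List.reverse_append]
    simp only [List.reverse_cons, List.reverse_nil, List.nil_append]
    cases hp : pick p with
    | some n => simp [hp]
    | none => simp [hp, ih]

-- A's pair of find-tests for one month collapses to one containment test on
-- its abbreviation, because the abbreviation is an infix of the full name.
theorem pv_cond2 (u full k : String) (hk : k.toList <:+: full.toList) :
    (PySem.Str.find u full != -1 || PySem.Str.find u k != -1)
      = PySem.Str.isIn k u := by
  rcases h : PySem.Str.isIn k u with _ | _
  · rw [PySem.Str.isIn_eq _ _] at h
    have hnk : ¬ k.toList <:+: u.toList := (PySem.Chars.isIn_eq_false_iff _ _).mp h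
    have hnf : ¬ full.toList <:+: u.toList := fun hf => hnk (hk.trans hf)
    simp only [PySem.Str.find_eq, Bool.or_eq_false_iff, bne_eq_false_iff_eq]
    exact ⟨(PySem.Chars.find_eq_neg_one_iff _ _).mpr hnf, (PySem.Chars.find_eq_neg_one_iff _ _).mpr hnk⟩
  · rw [PySem.Str.isIn_eq _ _] at h
    have hyk : k.toList <:+: u.toList := (PySem.Chars.isIn_iff_infix _ _).mp h
    simp only [PySem.Str.find_eq, Bool.or_eq_true_iff, bne_iff_ne]
    exact Or.inr ((PySem.Chars.find_ne_neg_one_iff _ _).mpr hyk)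

-- the SEPTEMBER triple collapses the same way
theorem pv_cond3 (u : String) :
    (PySem.Str.find u "SEPTEMBER" != -1 || PySem.Str.find u "SEPT" != -1
       || PySem.Str.find u "SEP" != -1)
      = PySem.Str.isIn "SEP" u := by
  rcases h : PySem.Str.isIn "SEP" u with _ | _
  · rw [PySem.Str.isIn_eq _ _] at h
    have hn : ¬ ("SEP".toList) <:+: u.toList := (PySem.Chars.isIn_eq_false_iff _ _).mp h
    have h1 : ¬ ("SEPTEMBER".toList) <:+: u.toList := fun hf =>
      hn ((by decide : ("SEP".toList) <:+: ("SEPTEMBER".toList)).trans hf)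
    have h2 : ¬ ("SEPT".toList) <:+: u.toList := fun hf =>
      hn ((by decide : ("SEP".toList) <:+: ("SEPT".toList)).trans hf)
    simp only [PySem.Str.find_eq, Bool.or_eq_false_iff, bne_eq_false_iff_eq]
    exact ⟨⟨(PySem.Chars.find_eq_neg_one_iff _ _).mpr h1, (PySem.Chars.find_eq_neg_one_iff _ _).mpr h2⟩,
           (PySem.Chars.find_eq_neg_one_iff _ _).mpr hn⟩
  · rw [PySem.Str.isIn_eq _ _] at h
    have hy : ("SEP".toList) <:+: u.toList := (PySem.Chars.isIn_iff_infix _ _).mp h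
    simp only [PySem.Str.find_eq, Bool.or_eq_true_iff, bne_iff_ne]
    exact Or.inr ((PySem.Chars.find_ne_neg_one_iff _ _).mpr hy)

-- one iteration of A's loop body = B's per-string reversed-table lookup
theorem pv_step_eq_pick (m i : String) :
    getWhenStep m i = (getWhenPick i).getD m := by
  have hfold : getWhenStep m i =
      getWhenMONTHS.foldl
        (fun m p => if PySem.Str.isIn p.1 (PySem.Str.upper i) then p.2 else m) m := by
    simp only [getWhenStep, getWhenMONTHS, List.foldl_cons, List.foldl_nil]
    rw [pv_cond2 _ "JANUARY" "JAN" (by decide), pv_cond2 _ "FEBRUARY" "FEB" (by decide),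
        pv_cond2 _ "MARCH" "MAR" (by decide), pv_cond2 _ "APRIL" "APRIL" (by decide),
        pv_cond2 _ "MAY" "MAY" (by decide), pv_cond2 _ "JUNE" "JUN" (by decide),
        pv_cond2 _ "JULY" "JUL" (by decide), pv_cond2 _ "AUGUST" "AUG" (by decide),
        pv_cond3, pv_cond2 _ "OCTOBER" "OCT" (by decide),
        pv_cond2 _ "NOVEMBER" "NOV" (by decide), pv_cond2 _ "DECEMBER" "DEC" (by decide)]
  rw [hfold, pv_foldl_eq_rev_findSome
        (fun p => if PySem.Str.isIn p.1 (PySem.Str.upper i) then some p.2 else none)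
        _ (by
            intro m p
            rcases hc : PySem.Chars.isIn p.1.toList (PySem.Chars.upper i.toList) <;>
              simp [PySem.Str.isIn_eq, hc])]
  rfl

-- B's outer loop is the backwards findSome? with default ""
theorem pv_outer_eq (l : List String) :
    getWhenOuter l = (l.findSome? getWhenPick).getD "" := by
  induction l with
  | nil => rfl
  | cons s rest ih =>
    rw [getWhenOuter, List.findSome?_cons]
    cases h : getWhenPick s <;> simp [h, ih]

-- ===== VERDICT (by name: the statement is the Claim_ definition above) =====
theorem getWhen_spec : Claim_equal_getWhen := by
  intro text _
  unfold Spec_getWhen getWhen getWhen_alt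
  rw [pv_foldl_eq_rev_findSome getWhenPick getWhenStep pv_step_eq_pick, pv_outer_eq]
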